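-- pv_equiv track=rewrite | github.com/petersawm/Leetcode-Solution | coding/bracket_expansion.py | expand_single_brace_part1
-- ===== SOURCE A (Python) =====
-- def _find_single_brace_pair(s: str):
--     l = s.find("{")
--     if l == -1:
--         return -1, -1
--     r = s.find("}", l + 1)
--     if r == -1 or r < l:
--         return -1, -1
--     first_close = s.find("}")
--     if first_close != -1 and first_close < l:
--         return -1, -1
--     return l, r
--
-- def expand_single_brace_part1(s: str):
--     l, r = _find_single_brace_pair(s)
--     if l == -1:
--         return [s] # no match
--     inside = s[l + 1: r]
--     tokens = [t for t in inside.split(",") if t != ""]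
--     if len(tokens) < 2:
--         return [s]
--
--     prefix = s[:l]
--     suffix = s[r + 1:]
--     return [prefix + t + suffix for t in tokens]
-- ===== SOURCE B (Python) =====
-- def expand_single_brace_part1(s: str):
--     # single left-to-right character scan (state machine) instead of find/slice/split
--     n = len(s)
--     i = 0
--     prefix_chars = []
--     while i < n and s[i] != '{' and s[i] != '}':
--         prefix_chars.append(s[i])
--         i += 1
--     if i == n or s[i] == '}':
--         return [s]
--     i += 1
--     tokens = []
--     buf = []
--     while i < n and s[i] != '}':
--         if s[i] == ',':
--             if buf:
--                 tokens.append(''.join(buf))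
--                 buf = []
--         else:
--             buf.append(s[i])
--         i += 1
--     if i == n:
--         return [s]
--     if buf:
--         tokens.append(''.join(buf))
--     if len(tokens) < 2:
--         return [s]
--     prefix = ''.join(prefix_chars)
--     suffix = s[i + 1:]
--     return [prefix + t + suffix for t in tokens]
-- ===== Notes on version B (the rewrite author's own statement) =====
-- stated objective: alternative
-- what changed: Replaces the multiple find() passes plus slicing and split()/filter with a single left-to-right character scan (state machine) that builds prefix, tokens and buffer in one pass.
import Mathlib
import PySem

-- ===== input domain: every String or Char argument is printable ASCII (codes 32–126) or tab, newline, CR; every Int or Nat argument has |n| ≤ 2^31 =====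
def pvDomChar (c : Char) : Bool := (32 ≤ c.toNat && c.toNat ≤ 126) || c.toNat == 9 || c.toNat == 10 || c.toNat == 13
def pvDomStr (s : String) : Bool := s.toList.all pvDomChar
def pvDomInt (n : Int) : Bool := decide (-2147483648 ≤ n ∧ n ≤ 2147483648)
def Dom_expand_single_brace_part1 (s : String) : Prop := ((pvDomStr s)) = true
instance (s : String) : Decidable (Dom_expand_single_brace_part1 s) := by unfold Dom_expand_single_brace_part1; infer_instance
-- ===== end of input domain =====

-- B replaces A's repeated find() passes + slicing + split()/filter with one left-to-right
-- character scan (state machine); same return value on every input (objective: alternative).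

-- ===== PORT A =====
def _find_single_brace_pair (s : String) : Int × Int :=
  let l := PySem.Str.find s "{"
  if l = -1 then (-1, -1)
  else
    let r := PySem.Str.findFrom s "}" (l + 1)
    if r = -1 ∨ r < l then (-1, -1)
    else
      let fc := PySem.Str.find s "}"
      if fc ≠ -1 ∧ fc < l then (-1, -1)
      else (l, r)

def expand_single_brace_part1 (s : String) : List String :=
  let lr := _find_single_brace_pair s
  if lr.1 = -1 then [s]
  else
    let inside := PySem.Str.slice s (some (lr.1 + 1)) (some lr.2)
    let tokens := ((PySem.Str.split? inside ",").getD []).filter (fun t => t ≠ "")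
    if tokens.length < 2 then [s]
    else
      let pre := PySem.Str.slice s none (some lr.1)
      let suf := PySem.Str.slice s (some (lr.2 + 1)) none
      tokens.map (fun t => pre ++ t ++ suf)

-- ===== PORT B =====
-- phase 1 of Source B's scan: collect prefix chars until '{'; abort (none) at '}' or end
def pvScanPrefix : List Char → Option (List Char × List Char)
  | [] => none
  | c :: cs =>
    if c = '}' then none
    else if c = '{' then some ([], cs)
    else match pvScanPrefix cs with
      | none => none
      | some (p, r) => some (c :: p, r)

-- phase 2 of Source B's scan: gather comma-separated tokens (dropping empties) until '}'
def pvScanTokens : List Char → List Char → List (List Char) → Option (List (List Char) × List Char)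
  | [], _, _ => none
  | c :: cs, buf, toks =>
    if c = '}' then some ((if buf = [] then toks else toks ++ [buf]), cs)
    else if c = ',' then pvScanTokens cs [] (if buf = [] then toks else toks ++ [buf])
    else pvScanTokens cs (buf ++ [c]) toks

def expand_single_brace_part1_alt (s : String) : List String :=
  match pvScanPrefix s.toList with
  | none => [s]
  | some (pre, rest) =>
    match pvScanTokens rest [] [] with
    | none => [s]
    | some (toks, suf) =>
      if toks.length < 2 then [s]
      else toks.map (fun t => String.ofList (pre ++ t ++ suf))

-- ===== PRECONDITION & SPEC =====
def Spec_expand_single_brace_part1 (s : String) (out : List String) : Prop := out = expand_single_brace_part1_alt s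
instance (s : String) (out : List String) : Decidable (Spec_expand_single_brace_part1 s out) := by unfold Spec_expand_single_brace_part1; infer_instance

-- ===== CLAIM (what is proved, stated in full; the proofs are below) =====
def Claim_equal_expand_single_brace_part1 : Prop := ∀ (s : String), Dom_expand_single_brace_part1 s → Spec_expand_single_brace_part1 s (expand_single_brace_part1 s)

-- ===== LEMMAS AND PROOFS =====
def pvSplitCommas : List Char → List (List Char)
  | [] => [[]]
  | c :: cs => if c = ',' then [] :: pvSplitCommas cs
    else (pvSplitCommas cs).modifyHead (c :: ·)

theorem pvSplitOn_go_comma (l : List Char) : ∀ (fuel : Nat) (cur : List Char) (acc : List (List Char)),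
    l.length ≤ fuel →
    PySem.Chars.splitOn.go [','] fuel l cur acc
      = acc.reverse ++ (pvSplitCommas l).modifyHead (cur.reverse ++ ·) := by
  induction l with
  | nil =>
    intro fuel cur acc _
    cases fuel with
    | zero => rw [PySem.Chars.splitOn.go]; simp [pvSplitCommas]
    | succ f =>
      rw [PySem.Chars.splitOn.go]
      · simp [pvSplitCommas]
      · omega
  | cons c cs ih =>
    intro fuel cur acc hf
    cases fuel with
    | zero => simp at hf
    | succ f =>
      rw [PySem.Chars.splitOn.go]
      have hpf : [','].isPrefixOf (c :: cs) = (c == ',') := by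
        simp [List.isPrefixOf, eq_comm]
      by_cases hc : c = ','
      · subst hc
        simp only [hpf, beq_self_eq_true, if_pos]
        have : List.drop [','].length (',' :: cs) = cs := by simp
        rw [this, ih f [] (cur.reverse :: acc) (by simpa using Nat.le_of_succ_le_succ hf)]
        simp [pvSplitCommas]
        cases pvSplitCommas cs <;> simp
      · simp only [hpf, beq_iff_eq, if_neg hc]
        rw [ih f (c :: cur) acc (by simpa using Nat.le_of_succ_le_succ hf)]
        simp only [pvSplitCommas, if_neg hc, List.modifyHead_modifyHead]
        congr 1
        congr 1
        funext t
        simp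

theorem pvSplitOn_comma (l : List Char) : PySem.Chars.splitOn l [','] = pvSplitCommas l := by
  unfold PySem.Chars.splitOn
  rw [pvSplitOn_go_comma l (l.length + 1) [] [] (by omega)]
  cases pvSplitCommas l <;> simp
theorem pvSingleton_prefix (c : Char) (xs : List Char) : [c] <+: xs ↔ xs.head? = some c := by
  cases xs with
  | nil => simp
  | cons h t => simp [List.cons_prefix_cons, eq_comm]

theorem pvPrefix_drop (c : Char) (xs : List Char) (i : Nat) : [c] <+: xs.drop i ↔ xs[i]? = some c := by
  rw [pvSingleton_prefix, List.head?_drop]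

theorem pvFind_single_eq (l : List Char) (c : Char) (n : Nat)
    (h1 : l[n]? = some c) (h2 : ∀ i < n, l[i]? ≠ some c) :
    PySem.Chars.find l [c] = (n : Int) := by
  have hmem : c ∈ l := List.mem_of_getElem? h1
  have hin : [c] <:+: l := (List.singleton_infix_iff c l).mpr hmem
  have h0 : 0 ≤ PySem.Chars.find l [c] := (PySem.Chars.find_nonneg_iff l [c]).mpr hin
  obtain ⟨hp, hmin⟩ := PySem.Chars.find_spec h0
  set m := (PySem.Chars.find l [c]).toNat with hm
  have hmc : l[m]? = some c := (pvPrefix_drop c l m).mp hp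
  have hne : m = n := by
    rcases lt_trichotomy m n with h | h | h
    · exact absurd hmc (h2 m h)
    · exact h
    · exact absurd ((pvPrefix_drop c l n).mpr h1) (hmin n h)
  omega

theorem pvFind_single_neg (l : List Char) (c : Char) (h : c ∉ l) :
    PySem.Chars.find l [c] = -1 := by
  rw [PySem.Chars.find_eq_neg_one_iff]
  exact fun hin => h ((List.singleton_infix_iff c l).mp hin)

theorem pvFind_decomp (c : Char) (pre post : List Char) (h : c ∉ pre) :
    PySem.Chars.find (pre ++ c :: post) [c] = (pre.length : Int) := by
  apply pvFind_single_eq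
  · simp
  · intro i hi
    rw [List.getElem?_append_left hi]
    intro hc
    exact h (by rw [List.mem_iff_getElem?]; exact ⟨i, hc⟩)



theorem pvScanPrefix_some (cs : List Char) : ∀ (pre rest : List Char), pvScanPrefix cs = some (pre, rest) →
    cs = pre ++ '{' :: rest ∧ ∀ c ∈ pre, c ≠ '{' ∧ c ≠ '}' := by
  induction cs with
  | nil => intro pre rest h; simp [pvScanPrefix] at h
  | cons c cs ih =>
    intro pre rest h
    simp only [pvScanPrefix] at h
    split_ifs at h with h1 h2
    · simp at h; obtain ⟨hp, hr⟩ := h; subst h2; subst hp; subst hr; simp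
    · cases hrec : pvScanPrefix cs with
      | none => rw [hrec] at h; simp at h
      | some pr =>
        rw [hrec] at h
        obtain ⟨p, r⟩ := pr
        simp at h
        obtain ⟨hp, hr⟩ := h
        obtain ⟨hcs, hfree⟩ := ih p r hrec
        subst hp; subst hr; subst hcs
        refine ⟨by simp, ?_⟩
        intro d hd
        rcases List.mem_cons.mp hd with h | h
        · subst h; exact ⟨h2, h1⟩
        · exact hfree d h

theorem pvScanPrefix_none (cs : List Char) (h : pvScanPrefix cs = none) :
    '{' ∉ cs ∨ ∃ pre rest, cs = pre ++ '}' :: rest ∧ ∀ c ∈ pre, c ≠ '{' ∧ c ≠ '}' := by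
  induction cs with
  | nil => simp
  | cons c cs ih =>
    simp only [pvScanPrefix] at h
    split_ifs at h with h1 h2
    · subst h1
      exact Or.inr ⟨[], cs, by simp, by simp⟩
    · cases hrec : pvScanPrefix cs with
      | none =>
        rcases ih hrec with hno | ⟨pre, rest, hcs, hfree⟩
        · left
          simp only [List.mem_cons, not_or]
          exact ⟨fun e => h2 e.symm, hno⟩
        · right
          refine ⟨c :: pre, rest, by simp [hcs], ?_⟩
          intro d hd
          rcases List.mem_cons.mp hd with hh | hh
          · subst hh; exact ⟨h2, h1⟩
          · exact hfree d hh
      | some pr => rw [hrec] at h; obtain ⟨p, r⟩ := pr; simp at h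

theorem pvScanTokens_none (rem : List Char) : ∀ (buf : List Char) (toks : List (List Char)),
    pvScanTokens rem buf toks = none → '}' ∉ rem := by
  induction rem with
  | nil => simp
  | cons c cs ih =>
    intro buf toks h
    simp only [pvScanTokens] at h
    by_cases h1 : c = '}'
    · rw [if_pos h1] at h; simp at h
    · rw [if_neg h1] at h
      simp only [List.mem_cons, not_or]
      by_cases h2 : c = ','
      · rw [if_pos h2] at h
        exact ⟨fun e => h1 e.symm, ih _ _ h⟩
      · rw [if_neg h2] at h
        exact ⟨fun e => h1 e.symm, ih _ _ h⟩

theorem pvScanTokens_some (rem : List Char) : ∀ (buf : List Char) (toks res : List (List Char)) (suf : List Char),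
    pvScanTokens rem buf toks = some (res, suf) →
    ∃ inside, rem = inside ++ '}' :: suf ∧ '}' ∉ inside ∧
      res = toks ++ ((pvSplitCommas inside).modifyHead (buf ++ ·)).filter (· ≠ []) := by
  induction rem with
  | nil => intro buf toks res suf h; simp [pvScanTokens] at h
  | cons c cs ih =>
    intro buf toks res suf h
    simp only [pvScanTokens] at h
    by_cases h1 : c = '}'
    · subst h1
      rw [if_pos rfl, Option.some_inj, Prod.mk.injEq] at h
      obtain ⟨hres, hsuf⟩ := h
      subst hsuf
      refine ⟨[], rfl, by simp, ?_⟩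
      rw [← hres]
      by_cases hb : buf = [] <;> simp [pvSplitCommas, hb]
    · rw [if_neg h1] at h
      by_cases h2 : c = ','
      · subst h2
        rw [if_pos rfl] at h
        obtain ⟨inside, hrem, hnotin, hres⟩ := ih _ _ _ _ h
        refine ⟨',' :: inside, by simp [hrem], ?_, ?_⟩
        · simp only [List.mem_cons, not_or]
          exact ⟨fun e => h1 e.symm, hnotin⟩
        · subst hres
          rcases hne : pvSplitCommas inside with _ | ⟨tk, ts⟩ <;>
            by_cases hb : buf = [] <;>
              simp [pvSplitCommas, hb, hne, List.filter_cons]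
      · rw [if_neg h2] at h
        obtain ⟨inside, hrem, hnotin, hres⟩ := ih _ _ _ _ h
        refine ⟨c :: inside, by simp [hrem], ?_, ?_⟩
        · simp only [List.mem_cons, not_or]
          exact ⟨fun e => h1 e.symm, hnotin⟩
        · subst hres
          simp only [pvSplitCommas, if_neg h2, List.modifyHead_modifyHead]
          congr 2
          congr 1
          funext t
          simp

-- ===== VERDICT (by name: the statement is the Claim_ definition above) =====
theorem pvNotMem_of_free (pre : List Char) (hfree : ∀ c ∈ pre, c ≠ '{' ∧ c ≠ '}') :
    '{' ∉ pre ∧ '}' ∉ pre :=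
  ⟨fun hm => (hfree _ hm).1 rfl, fun hm => (hfree _ hm).2 rfl⟩

theorem pvFind_get (l : List Char) (c : Char) (h : 0 ≤ PySem.Chars.find l [c]) :
    l[(PySem.Chars.find l [c]).toNat]? = some c :=
  (pvPrefix_drop _ _ _).mp (PySem.Chars.find_spec h).1

theorem pvIndex_bound {l pre rest : List Char} {x c : Char} {n : Nat} (hcs : l = pre ++ x :: rest)
    (hn : l[n]? = some c) (hc : c ∉ pre) (hx : x ≠ c) : pre.length < n := by
  rcases Nat.lt_trichotomy n pre.length with h | h | h
  · rw [hcs, List.getElem?_append_left h] at hn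
    exact absurd (List.mem_of_getElem? hn) hc
  · exfalso
    rw [hcs, h, List.getElem?_append_right (le_refl _)] at hn
    simp at hn
    exact hx hn
  · exact h

set_option maxHeartbeats 1000000 in
theorem expand_single_brace_part1_spec : Claim_equal_expand_single_brace_part1 := by
  unfold Claim_equal_expand_single_brace_part1
  intro s _
  unfold Spec_expand_single_brace_part1
  have hbrL : ("{" : String).toList = ['{'] := by decide
  have hbrR : ("}" : String).toList = ['}'] := by decide
  have hbrC : ("," : String).toList = [','] := by decide
  cases hp1 : pvScanPrefix s.toList with
  | none =>
    have hfst : (_find_single_brace_pair s).1 = -1 := by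
      simp only [_find_single_brace_pair, PySem.Str.find_eq, PySem.Str.findFrom_eq, hbrL, hbrR]
      rcases pvScanPrefix_none _ hp1 with hno | ⟨pre, rest, hcs, hfree⟩
      · rw [if_pos (pvFind_single_neg _ _ hno)]
      · obtain ⟨hnb, hnc⟩ := pvNotMem_of_free pre hfree
        have hfc : PySem.Chars.find s.toList ['}'] = (pre.length : Int) := by
          rw [hcs, pvFind_decomp _ _ _ hnc]
        by_cases hno : '{' ∈ s.toList
        · have hl0 : 0 ≤ PySem.Chars.find s.toList ['{'] :=
            (PySem.Chars.find_nonneg_iff _ _).mpr ((List.singleton_infix_iff _ _).mpr hno)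
          have hlgt : (pre.length : Int) < PySem.Chars.find s.toList ['{'] := by
            have := pvIndex_bound hcs (pvFind_get s.toList '{' hl0) hnb (by decide)
            omega
          rw [if_neg (by omega)]
          by_cases hrc : PySem.Chars.findFrom s.toList ['}'] (PySem.Chars.find s.toList ['{'] + 1) = -1 ∨
              PySem.Chars.findFrom s.toList ['}'] (PySem.Chars.find s.toList ['{'] + 1) <
                PySem.Chars.find s.toList ['{']
          · rw [if_pos hrc]
          · rw [if_neg hrc, if_pos ⟨by omega, by omega⟩]
        · rw [if_pos (pvFind_single_neg _ _ hno)]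
    simp [expand_single_brace_part1, hfst, expand_single_brace_part1_alt, hp1]
  | some pr =>
    obtain ⟨pre, rest⟩ := pr
    obtain ⟨hcs, hfree⟩ := pvScanPrefix_some _ _ _ hp1
    obtain ⟨hnb, hnc⟩ := pvNotMem_of_free pre hfree
    have hl : PySem.Chars.find s.toList ['{'] = (pre.length : Int) := by
      rw [hcs, pvFind_decomp _ _ _ hnb]
    have hdrop : List.drop (pre.length + 1) s.toList = rest := by
      have h1 : s.toList = (pre ++ ['{']) ++ rest := by simp [hcs]
      have hlen1 : (pre ++ ['{']).length = pre.length + 1 := by simp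
      rw [h1, ← hlen1, List.drop_left]
    have hklen : pre.length + 1 ≤ s.toList.length := by
      rw [hcs]; simp
    have hcast1 : (pre.length : Int) + 1 = ((pre.length + 1 : Nat) : Int) := by push_cast; ring
    have hr : PySem.Chars.findFrom s.toList ['}'] ((pre.length : Int) + 1) =
        if PySem.Chars.find rest ['}'] = -1 then -1
        else ((pre.length + 1 : Nat) : Int) + PySem.Chars.find rest ['}'] := by
      rw [hcast1, PySem.Chars.findFrom_natCast _ _ _ hklen, hdrop]
    have hfc : ¬(PySem.Chars.find s.toList ['}'] ≠ -1 ∧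
        PySem.Chars.find s.toList ['}'] < (pre.length : Int)) := by
      rintro ⟨hne, hlt⟩
      have h0 : 0 ≤ PySem.Chars.find s.toList ['}'] := by
        have := PySem.Chars.neg_one_le_find s.toList ['}']
        omega
      have := pvIndex_bound hcs (pvFind_get s.toList '}' h0) hnc (by decide)
      omega
    cases hp2 : pvScanTokens rest [] [] with
    | none =>
      have hrn : '}' ∉ rest := pvScanTokens_none _ _ _ hp2
      have hfst : (_find_single_brace_pair s).1 = -1 := by
        simp only [_find_single_brace_pair, PySem.Str.find_eq, PySem.Str.findFrom_eq, hbrL, hbrR]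
        rw [hl, if_neg (by omega), hr, if_pos (pvFind_single_neg _ _ hrn), if_pos (Or.inl rfl)]
      simp [expand_single_brace_part1, hfst, expand_single_brace_part1_alt, hp1, hp2]
    | some pr2 =>
      obtain ⟨toks, suf⟩ := pr2
      obtain ⟨inside, hrest, hnin, htoks⟩ := pvScanTokens_some _ _ _ _ _ hp2
      have hfr : PySem.Chars.find rest ['}'] = (inside.length : Int) := by
        rw [hrest, pvFind_decomp _ _ _ hnin]
      have hrval : PySem.Chars.findFrom s.toList ['}'] ((pre.length : Int) + 1) =
          ((pre.length + 1 + inside.length : Nat) : Int) := by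
        rw [hr, hfr, if_neg (by omega)]
        push_cast; ring
      have hfind : _find_single_brace_pair s =
          ((pre.length : Int), ((pre.length + 1 + inside.length : Nat) : Int)) := by
        simp only [_find_single_brace_pair, PySem.Str.find_eq, PySem.Str.findFrom_eq, hbrL, hbrR]
        rw [hl, if_neg (by omega), hrval, if_neg (by rintro (h | h) <;> omega), if_neg hfc]
      have htoks' : toks = (pvSplitCommas inside).filter (· ≠ []) := by
        rw [htoks]
        have hmid : List.modifyHead (fun x => [] ++ x) (pvSplitCommas inside) = pvSplitCommas inside := by
          cases pvSplitCommas inside <;> simp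
        rw [hmid]
        simp
      have hpreA : (PySem.Str.slice s none (some (pre.length : Int))).toList = pre := by
        rw [PySem.Str.toList_slice, PySem.Chars.slice_eq_listSlice, PySem.List.slice_to_natCast,
          hcs, List.take_left]
      have hinsA : (PySem.Str.slice s (some ((pre.length : Int) + 1))
          (some ((pre.length + 1 + inside.length : Nat) : Int))).toList = inside := by
        rw [PySem.Str.toList_slice, PySem.Chars.slice_eq_listSlice, hcast1,
          PySem.List.slice_natCast]
        have h2 : pre.length + 1 + inside.length - (pre.length + 1) = inside.length := by omega
        rw [h2, hdrop, hrest]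
        exact List.take_left' rfl
      have hflat : s.toList = (pre ++ '{' :: inside ++ ['}']) ++ suf := by
        rw [hcs, hrest]; simp
      have hsufA : PySem.List.slice s.toList
          (some ((pre.length : Int) + 1 + (inside.length : Int) + 1)) none = suf := by
        have hc2 : (pre.length : Int) + 1 + (inside.length : Int) + 1
            = ((pre.length + 1 + inside.length + 1 : Nat) : Int) := by push_cast; ring
        rw [hc2, PySem.List.slice_from_natCast, hflat]
        apply List.drop_left'
        simp
        omega
      have hsp : Option.map (List.map String.toList)
          (PySem.Str.split? (PySem.Str.slice s (some ((pre.length : Int) + 1))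
            (some ((pre.length + 1 + inside.length : Nat) : Int))) ",") = some (pvSplitCommas inside) := by
        rw [PySem.Str.split?_map, hinsA, hbrC]
        simp [PySem.Chars.split?, pvSplitOn_comma]
      obtain ⟨ts, hts, hmap⟩ := Option.map_eq_some_iff.mp hsp
      have hcomp : ((fun l : List Char => decide (l ≠ [])) ∘ String.toList)
          = (fun t : String => decide (t ≠ "")) := by
        funext t
        rw [Function.comp_apply, decide_eq_decide]
        apply not_congr
        constructor
        · intro h
          rw [← String.toList_inj, h]
          decide
        · intro h
          rw [h]
          decide
      have hmapf : (ts.filter (fun t => t ≠ "")).map String.toList = toks := by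
        rw [htoks', ← hmap, List.filter_map, hcomp]
      have hlen : (ts.filter (fun t => t ≠ "")).length = toks.length := by
        rw [← hmapf, List.length_map]
      simp only [expand_single_brace_part1, hfind, expand_single_brace_part1_alt, hp1, hp2]
      rw [if_neg (by omega), hts]
      simp only [Option.getD_some]
      by_cases h2 : toks.length < 2
      · rw [if_pos (by omega), if_pos h2]
      · rw [if_neg (by omega), if_neg h2, ← hmapf, List.map_map]
        apply List.map_congr_left
        intro t ht
        apply String.toList_inj.mp
        simp [String.toList_append, hpreA, hsufA]
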